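-- pv_equiv track=rewrite | github.com/Z-MarkUs/Prompt-Refinement-for-AI-Coding-Assistance | AutoTest/leetcode_solutions/4o_3.5/1554.py | differByOne
-- ===== SOURCE A (Python) =====
-- from typing import List
--
-- def differByOne(dict: List[str]) -> bool:
--     patterns = set()
--
--     for word in dict:
--         for i in range(len(word)):
--             pattern = word[:i] + '*' + word[i+1:]
--             if pattern in patterns:
--                 return True
--             patterns.add(pattern)
--
--     return False
-- ===== SOURCE B (Python) =====
-- def differByOne(dict):
--     pats = sorted(w[:i] + '*' + w[i+1:] for w in dict for i in range(len(w)))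
--     return any(x == y for x, y in zip(pats, pats[1:]))
-- ===== Notes on version B (the rewrite author's own statement) =====
-- stated objective: alternative
-- what changed: Replaces A's incremental hash-set with early return by building the full pattern list, sorting it, and scanning adjacent entries for a duplicate (sort-then-scan instead of hash lookup).
import Mathlib
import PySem

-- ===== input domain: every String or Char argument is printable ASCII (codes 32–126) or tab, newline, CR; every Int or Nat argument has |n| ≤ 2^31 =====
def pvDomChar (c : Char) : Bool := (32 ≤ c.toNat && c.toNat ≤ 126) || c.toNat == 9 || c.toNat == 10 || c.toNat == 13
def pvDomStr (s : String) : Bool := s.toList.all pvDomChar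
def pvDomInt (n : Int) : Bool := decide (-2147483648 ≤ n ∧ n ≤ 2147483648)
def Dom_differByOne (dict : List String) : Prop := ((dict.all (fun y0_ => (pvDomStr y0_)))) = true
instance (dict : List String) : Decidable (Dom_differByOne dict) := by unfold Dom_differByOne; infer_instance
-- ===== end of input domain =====

-- B replaces A's incremental pattern set (early return on first collision) by sort-then-scan:
-- build all wildcard patterns, sort them, and look for an equal adjacent pair (alternative algorithm, same result).


-- ===== PORT A =====
-- word[:i] + '*' + word[i+1:]  (shared pattern helper; both Pythons compute this expression)
def pvPat (w : String) (i : Int) : String :=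
  String.ofList (PySem.List.slice w.toList none (some i) ++ '*' :: PySem.List.slice w.toList (some (i + 1)) none)

-- inner 'for i in range(len(word))' loop of A, with its early return and the pattern set
def pvInnerA (w : String) (idxs : List Int) (patterns : PySem.Set String) : Bool × PySem.Set String :=
  match idxs with
  | [] => (false, patterns)
  | i :: rest =>
    let pattern := pvPat w i
    if pattern ∈ patterns then (true, patterns)
    else pvInnerA w rest (PySem.Set.add patterns pattern)

-- outer 'for word in dict' loop of A
def pvOuterA (ws : List String) (patterns : PySem.Set String) : Bool :=
  match ws with
  | [] => false
  | w :: rest =>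
    let r := pvInnerA w (PySem.List.pyRange 0 (PySem.Str.len w) 1) patterns
    if r.1 then true else pvOuterA rest r.2

def differByOne (dict : List String) : Bool :=
  pvOuterA dict PySem.Set.empty

-- ===== PORT B =====
-- the generator: all patterns of all words, in order
def pvPats (dict : List String) : List String :=
  dict.flatMap (fun w => (PySem.List.pyRange 0 (PySem.Str.len w) 1).map (fun i => pvPat w i))

def differByOne_alt (dict : List String) : Bool :=
  let pats := PySem.List.sorted (pvPats dict) (fun x => x) false
  ((pats.zip (PySem.List.slice pats (some 1) none)).any (fun p => p.1 == p.2))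

-- ===== PRECONDITION & SPEC =====
def Spec_differByOne (dict : List String) (out : Bool) : Prop := out = differByOne_alt dict
instance (dict : List String) (out : Bool) : Decidable (Spec_differByOne dict out) := by unfold Spec_differByOne; infer_instance

-- ===== CLAIM (what is proved, stated in full; the proofs are below) =====
def Claim_equal_differByOne : Prop := ∀ (dict : List String), Dom_differByOne dict → Spec_differByOne dict (differByOne dict)

-- ===== LEMMAS AND PROOFS =====

-- A's inner loop: returns true iff a duplicate appears among (accumulated set ++ this word's patterns);
-- if no collision, the resulting set is exactly the accumulated list extended by this word's patterns.
theorem pvInnerA_spec (w : String) (idxs : List Int) (s : List String) (hs : s.Nodup) :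
    ((pvInnerA w idxs s).1 = true ↔ ¬ (s ++ idxs.map (pvPat w)).Nodup) ∧
    ((pvInnerA w idxs s).1 = false →
      (pvInnerA w idxs s).2 = s ++ idxs.map (pvPat w) ∧ (s ++ idxs.map (pvPat w)).Nodup) := by
  induction idxs generalizing s with
  | nil => simp [pvInnerA, hs]
  | cons i rest ih =>
    by_cases hmem : pvPat w i ∈ s
    · simp only [pvInnerA, if_pos hmem]
      constructor
      · simp only [List.map_cons, true_iff]
        intro hnd
        exact (List.disjoint_of_nodup_append hnd) hmem (by simp)
      · intro h; cases h
    · have hadd : PySem.Set.add s (pvPat w i) = s ++ [pvPat w i] :=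
        PySem.Set.add_of_not_mem hmem
      have hs' : (s ++ [pvPat w i]).Nodup := by
        simp only [List.nodup_append, List.nodup_cons, List.not_mem_nil, not_false_iff,
          List.nodup_nil, and_true, true_and]
        refine ⟨hs, fun a ha b hb heq => ?_⟩
        rw [List.mem_singleton.mp hb] at heq
        exact hmem (heq ▸ ha)
      have := ih (s ++ [pvPat w i]) hs'
      simp only [pvInnerA, if_neg hmem, hadd]
      simpa [List.append_assoc] using this
  -- A's outer loop: true iff the patterns so far ++ remaining patterns contain a duplicate

theorem pvOuterA_spec (ws : List String) (s : List String) (hs : s.Nodup) :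
    (pvOuterA ws s = true ↔ ¬ (s ++ pvPats ws).Nodup) := by
  induction ws generalizing s with
  | nil => simp [pvOuterA, pvPats, hs]
  | cons w rest ih =>
    have hinner := pvInnerA_spec w (PySem.List.pyRange 0 (PySem.Str.len w) 1) s hs
    simp only [pvOuterA]
    by_cases hb : (pvInnerA w (PySem.List.pyRange 0 (PySem.Str.len w) 1) s).1 = true
    · have hdup := hinner.1.mp hb
      simp only [hb, if_true, true_iff]
      intro hnd
      apply hdup
      have hsub : (s ++ (PySem.List.pyRange 0 (PySem.Str.len w) 1).map (pvPat w)).Sublist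
          (s ++ pvPats (w :: rest)) := by
        apply List.Sublist.append_left
        simp only [pvPats, List.flatMap_cons]
        exact List.sublist_append_left _ _
      exact hsub.nodup hnd
    · have hbf : (pvInnerA w (PySem.List.pyRange 0 (PySem.Str.len w) 1) s).1 = false :=
        Bool.not_eq_true _ ▸ (by simpa using hb)
      have h2 := hinner.2 hbf
      simp only [hbf, Bool.false_eq_true, if_false, h2.1]
      rw [ih _ h2.2]
      simp [pvPats, List.append_assoc]

-- on a ≤-sorted list, an equal adjacent pair exists iff the list has a duplicate
theorem adj_eq_not_nodup (Q : List String) (h : Q.Pairwise (· ≤ ·)) :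
    ((Q.zip Q.tail).any (fun p => p.1 == p.2)) = !Q.Nodup := by
  induction Q with
  | nil => simp
  | cons a t iht =>
    cases t with
    | nil => simp
    | cons b u =>
      have htail : (b :: u).Pairwise (· ≤ ·) := h.tail
      by_cases hab : a = b
      · subst hab
        simp
      · have hle : a ≤ b := (List.pairwise_cons.mp h).1 b (by simp)
        have hnotmem : a ∉ b :: u := by
          intro hmem
          rcases List.mem_cons.mp hmem with h1 | h2
          · exact hab h1
          · have hbu : b ≤ a := (List.pairwise_cons.mp htail).1 a h2
            exact hab (le_antisymm hle hbu)
        have := iht htail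
        simp only [List.tail_cons, List.zip_cons_cons, List.any_cons] at this ⊢
        simp [hab, this, hnotmem]

-- ===== VERDICT (by name: the statement is the Claim_ definition above) =====
theorem differByOne_spec : Claim_equal_differByOne := by
  intro dict _
  unfold Spec_differByOne
  have hA : differByOne dict = true ↔ ¬ (pvPats dict).Nodup := by
    have := pvOuterA_spec dict [] (by simp)
    simpa [differByOne, PySem.Set.empty] using this
  have hQperm : (PySem.List.sorted (pvPats dict) (fun x => x) false).Perm (pvPats dict) :=
    PySem.List.sorted_perm _ _ _
  have hB : differByOne_alt dict = !(pvPats dict).Nodup := by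
    simp only [differByOne_alt]
    rw [PySem.List.slice_from_one]
    rw [adj_eq_not_nodup _ (PySem.List.sorted_pairwise (pvPats dict) (fun x => x))]
    simp [hQperm.nodup_iff]
  by_cases hnd : (pvPats dict).Nodup
  · have : differByOne dict ≠ true := fun h => (hA.mp h) hnd
    simp [hB, hnd, Bool.not_eq_true] at this ⊢
    exact this
  · simp [hB, hnd, hA.mpr hnd]
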